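-- pv_equiv track=rewrite | github.com/patrick7star/python-utilitarios | src/numeros_por_extenso.py | decompoe
-- ===== SOURCE A (Python) =====
-- def decompoe(numero):
--    # pilha contendo algarismos.
--    pilha_algs = []
--
--    # empilhando algarismos ...
--    for alg in str(numero):
--       pilha_algs.append(int(alg))
--
--    # faz sempre a quantia de algs. um
--    # múltiplo de três.
--    qtd = len(pilha_algs)
--    if qtd % 3 == 1:
--       pilha_algs.insert(0, 0)
--       pilha_algs.insert(0, 0)
--    elif qtd % 3 == 2:
--       pilha_algs.insert(0, 0)
--
--    return pilha_algs
-- ===== SOURCE B (Python) =====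
-- def decompoe(numero):
--     # split the number into base-1000 groups arithmetically (no string conversion);
--     # each group expands to exactly three digits, so the multiple-of-three shape
--     # is automatic and no padding/insert step exists.
--     groups = []
--     n = numero
--     while n > 0:
--         n, g = divmod(n, 1000)
--         groups.append(g)
--     if not groups:
--         groups = [0]
--     saida = []
--     for g in reversed(groups):
--         saida += [g // 100, g // 10 % 10, g % 10]
--     return saida
-- ===== Notes on version B (the rewrite author's own statement) =====
-- stated objective: alternative
-- what changed: B never converts the number to a string: it splits it into base-1000 groups with a divmod loop and expands each group into exactly three digits, so the multiple-of-three shape is automatic and A's str()/int() digit parsing and the insert/if-elif padding step disappear.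
import Mathlib
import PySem

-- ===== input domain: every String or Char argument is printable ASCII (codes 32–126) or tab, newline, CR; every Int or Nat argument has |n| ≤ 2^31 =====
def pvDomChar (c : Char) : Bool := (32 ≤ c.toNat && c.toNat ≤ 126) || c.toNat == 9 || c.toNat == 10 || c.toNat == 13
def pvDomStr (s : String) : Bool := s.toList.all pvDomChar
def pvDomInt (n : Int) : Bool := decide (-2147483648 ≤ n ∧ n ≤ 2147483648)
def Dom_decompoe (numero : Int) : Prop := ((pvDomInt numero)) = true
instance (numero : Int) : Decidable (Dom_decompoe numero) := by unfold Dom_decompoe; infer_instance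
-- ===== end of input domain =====

-- B splits the number into base-1000 groups with a divmod loop (no string conversion) and
-- expands each group into exactly three digits, so A's str()/int() parsing and insert/if-elif
-- padding disappear; objective: alternative. Return values agree on Pre_ (numero ≥ 0).

-- ===== PORT A =====
-- int(c) for a single decimal digit character (exact there; Pre_ guarantees str(numero) is all digits)
def pvDigit (c : Char) : Int := (c.toNat : Int) - 48

def decompoe (numero : Int) : List Int :=
  -- for alg in str(numero): pilha_algs.append(int(alg))
  let pilha_algs := (PySem.Int.toChars numero).foldl (fun acc c => acc ++ [pvDigit c]) []
  let qtd := PySem.List.len pilha_algs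
  if PySem.Int.mod qtd 3 == 1 then
    PySem.List.insert (PySem.List.insert pilha_algs 0 0) 0 0
  else if PySem.Int.mod qtd 3 == 2 then
    PySem.List.insert pilha_algs 0 0
  else
    pilha_algs

-- ===== PORT B =====
-- while n > 0: n, g = divmod(n, 1000); groups.append(g)
def pvGroupsLoop (n : Int) (groups : List Int) : List Int :=
  if _h : 0 < n then
    pvGroupsLoop (PySem.Int.floordiv n 1000) (groups ++ [PySem.Int.mod n 1000])
  else groups
termination_by n.toNat
decreasing_by
  have := PySem.Int.floordiv_lt_iff_lt_mul (a := n) (b := 1000) (q := n) (by norm_num)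
  omega

def decompoe_alt (numero : Int) : List Int :=
  let groups := pvGroupsLoop numero []
  let groups := if groups = [] then [0] else groups
  groups.reverse.foldl
    (fun saida g =>
      saida ++ [PySem.Int.floordiv g 100,
                PySem.Int.mod (PySem.Int.floordiv g 10) 10,
                PySem.Int.mod g 10]) []

-- ===== PRECONDITION & SPEC =====
-- Pre_ excludes exactly the negative inputs: there str(numero) starts with '-' and int('-')
-- raises ValueError in A.
def Pre_decompoe (numero : Int) : Prop := 0 ≤ numero
instance (numero : Int) : Decidable (Pre_decompoe numero) := by unfold Pre_decompoe; infer_instance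
def pvWitness_decompoe : Int := (90210)
def Spec_decompoe (numero : Int) (out : List Int) : Prop := out = decompoe_alt numero
instance (numero : Int) (out : List Int) : Decidable (Spec_decompoe numero out) := by unfold Spec_decompoe; infer_instance

-- ===== CLAIM (what is proved, stated in full; the proofs are below) =====
def Claim_equal_decompoe : Prop := ∀ (numero : Int), Dom_decompoe numero → Pre_decompoe numero → Spec_decompoe numero (decompoe numero)

-- ===== LEMMAS AND PROOFS =====

-- decimal digits of a natural number, most significant first (mathematical reference form)
def pvDigN (m : Nat) : List Nat :=
  if _h : m < 10 then [m] else pvDigN (m / 10) ++ [m % 10]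
decreasing_by exact Nat.div_lt_self (by omega) (by omega)

-- base-1000 groups, least significant first (mathematical reference form)
def pvGrevN (m : Nat) : List Nat :=
  if _h : m = 0 then [] else (m % 1000) :: pvGrevN (m / 1000)
decreasing_by exact Nat.div_lt_self (by omega) (by omega)

-- A's padding step as a function of the digit list
def pvPad (L : List Int) : List Int :=
  if L.length % 3 = 1 then 0 :: 0 :: L else if L.length % 3 = 2 then 0 :: L else L

-- three digits of one base-1000 group
def pvTrip (g : Nat) : List Int := [(g / 100 : Nat), (g / 10 % 10 : Nat), (g % 10 : Nat)]

lemma pvDigN_lt (m : Nat) : ∀ x ∈ pvDigN m, x < 10 := by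
  induction m using Nat.strong_induction_on with
  | _ m ih =>
    rw [pvDigN]
    split
    · intro x hx; simp at hx; omega
    · intro x hx
      rcases List.mem_append.mp hx with h | h
      · exact ih (m / 10) (Nat.div_lt_self (by omega) (by omega)) x h
      · simp at h; omega

lemma toDigitsCore_spec (fuel m : Nat) (acc : List Char) (h : m < fuel) :
    Nat.toDigitsCore 10 fuel m acc = (pvDigN m).map Nat.digitChar ++ acc := by
  induction fuel generalizing m acc with
  | zero => omega
  | succ f ih =>
    rw [Nat.toDigitsCore]
    by_cases hm : m < 10
    · have h0 : m / 10 = 0 := Nat.div_eq_of_lt hm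
      have hmod : m % 10 = m := Nat.mod_eq_of_lt hm
      rw [pvDigN]
      simp [h0, hmod, hm]
    · have h0 : m / 10 ≠ 0 := by
        intro h0; exact hm (by omega)
      have hlt : m / 10 < f := by
        have : m / 10 < m := Nat.div_lt_self (by omega) (by omega)
        omega
      rw [if_neg h0, ih (m / 10) _ hlt]
      conv_rhs => rw [pvDigN]
      rw [dif_neg (by omega : ¬ m < 10)]
      simp

lemma toDigits_spec (m : Nat) :
    Nat.toDigits 10 m = (pvDigN m).map Nat.digitChar := by
  have := toDigitsCore_spec (m + 1) m [] (by omega)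
  simpa [Nat.toDigits] using this

lemma pvDigit_digitChar (d : Nat) (h : d < 10) : pvDigit (Nat.digitChar d) = d := by
  interval_cases d <;> decide

lemma foldl_app_digit (l : List Char) (acc : List Int) :
    l.foldl (fun a c => a ++ [pvDigit c]) acc = acc ++ l.map pvDigit := by
  induction l generalizing acc with
  | nil => simp
  | cons c t ih => simp [ih]

-- A's digit list is the mathematical digit list
lemma a_digits (m : Nat) :
    (Nat.toDigits 10 m).map pvDigit = (pvDigN m).map (fun d : Nat => (d : Int)) := by
  rw [toDigits_spec, List.map_map]
  apply List.map_congr_left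
  intro d hd
  have := pvDigit_digitChar d (pvDigN_lt m d hd)
  simpa using this

-- A's if/elif padding as pvPad
lemma pad_if (L : List Int) :
    (if ((L.length : Int)) % 3 == 1 then 0 :: 0 :: L
     else if ((L.length : Int)) % 3 == 2 then 0 :: L else L) = pvPad L := by
  unfold pvPad
  have h : ((L.length : Int)) % 3 = ((L.length % 3 : Nat) : Int) := (Int.natCast_mod _ 3).symm
  have h3 : L.length % 3 < 3 := Nat.mod_lt _ (by norm_num)
  rw [h]
  interval_cases hh : L.length % 3 <;> simp

-- A = pvPad of the digit list
lemma a_char (m : Nat) :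
    decompoe (m : Int) = pvPad ((pvDigN m).map (fun d : Nat => (d : Int))) := by
  unfold decompoe
  have hneg : ¬ ((m : Int) < 0) := by omega
  simp only [PySem.Int.toChars, if_neg hneg, Int.toNat_natCast, foldl_app_digit,
    List.nil_append, a_digits, PySem.List.len_eq, List.length_map, PySem.List.insert_zero]
  rw [PySem.Int.mod_eq_emod_of_pos (by norm_num)]
  have := pad_if ((pvDigN m).map (fun d : Nat => (d : Int)))
  simpa using this

-- the groups loop computes the base-1000 groups
lemma groupsLoop_spec (m : Nat) (acc : List Int) :
    pvGroupsLoop (m : Int) acc = acc ++ (pvGrevN m).map (fun g : Nat => (g : Int)) := by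
  induction m using Nat.strong_induction_on generalizing acc with
  | _ m ih =>
    rw [pvGroupsLoop, pvGrevN]
    by_cases hm : m = 0
    · simp [hm]
    · have hpos : (0 : Int) < m := by omega
      have hdiv : PySem.Int.floordiv (m : Int) 1000 = ((m / 1000 : Nat) : Int) := by
        rw [PySem.Int.floordiv_eq_iff_of_pos (by norm_num)]
        constructor <;> · push_cast; omega
      have hmod : PySem.Int.mod (m : Int) 1000 = ((m % 1000 : Nat) : Int) := by
        rw [PySem.Int.mod_eq_emod_of_pos (by norm_num)]
        push_cast
        omega
      rw [dif_pos hpos, hdiv, hmod,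
        ih (m / 1000) (Nat.div_lt_self (by omega) (by omega)),
        dif_neg hm]
      simp

lemma foldl_trip (gs : List Nat) (acc : List Int) :
    (gs.map (fun g : Nat => (g : Int))).foldl
      (fun saida g =>
        saida ++ [PySem.Int.floordiv g 100,
                  PySem.Int.mod (PySem.Int.floordiv g 10) 10,
                  PySem.Int.mod g 10]) acc
    = acc ++ gs.flatMap pvTrip := by
  induction gs generalizing acc with
  | nil => simp
  | cons g t ih =>
    have h100 : PySem.Int.floordiv (g : Int) 100 = ((g / 100 : Nat) : Int) := by
      rw [PySem.Int.floordiv_eq_iff_of_pos (by norm_num)]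
      constructor <;> · push_cast; omega
    have h10 : PySem.Int.floordiv (g : Int) 10 = ((g / 10 : Nat) : Int) := by
      rw [PySem.Int.floordiv_eq_iff_of_pos (by norm_num)]
      constructor <;> · push_cast; omega
    have hm10 : ∀ k : Nat, PySem.Int.mod (k : Int) 10 = ((k % 10 : Nat) : Int) := by
      intro k
      rw [PySem.Int.mod_eq_emod_of_pos (by norm_num)]
      push_cast; omega
    simp only [List.map_cons, List.foldl_cons, h100, h10, hm10, ih, List.flatMap_cons]
    simp [pvTrip]

-- padding commutes with appending a full group of three digits
lemma pvPad_append3 (L : List Int) (a b c : Int) :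
    pvPad (L ++ [a, b, c]) = pvPad L ++ [a, b, c] := by
  unfold pvPad
  have : (L ++ [a, b, c]).length % 3 = L.length % 3 := by
    simp
  rw [this]
  split_ifs <;> simp

-- digits unfold three at a time past 1000
lemma pvDigN_1000 (m : Nat) (h : 1000 ≤ m) :
    pvDigN m = pvDigN (m / 1000) ++ [m / 100 % 10, m / 10 % 10, m % 10] := by
  conv_lhs => rw [pvDigN]
  rw [dif_neg (by omega)]
  conv_lhs => rw [pvDigN]
  rw [dif_neg (by omega)]
  conv_lhs => rw [pvDigN]
  rw [dif_neg (by omega)]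
  have e1 : m / 10 / 10 = m / 100 := by omega
  have e2 : m / 100 / 10 = m / 1000 := by omega
  rw [e1, e2]
  simp

-- the expansion of the groups is the padded digit list (m > 0)
lemma expand_eq_pad (m : Nat) (h : 0 < m) :
    ((pvGrevN m).reverse).flatMap pvTrip
      = pvPad ((pvDigN m).map (fun d : Nat => (d : Int))) := by
  induction m using Nat.strong_induction_on with
  | _ m ih =>
    by_cases hbig : 1000 ≤ m
    · have hq : 0 < m / 1000 := by omega
      rw [pvGrevN, dif_neg (by omega)]
      simp only [List.reverse_cons, List.flatMap_append, List.flatMap_cons,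
        List.flatMap_nil, List.append_nil]
      rw [ih (m / 1000) (Nat.div_lt_self (by omega) (by omega)) hq,
        pvDigN_1000 m hbig]
      have ht : pvTrip (m % 1000) =
          [((m / 100 % 10 : Nat) : Int), ((m / 10 % 10 : Nat) : Int), ((m % 10 : Nat) : Int)] := by
        unfold pvTrip
        have e1 : m % 1000 / 100 = m / 100 % 10 := by omega
        have e2 : m % 1000 / 10 % 10 = m / 10 % 10 := by omega
        have e3 : m % 1000 % 10 = m % 10 := by omega
        rw [e1, e2, e3]
      rw [ht]
      simp only [List.map_append, List.map_cons, List.map_nil]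
      rw [pvPad_append3]
    · -- 0 < m < 1000 : a single group
      have hq : m / 1000 = 0 := by omega
      rw [pvGrevN, dif_neg (by omega), pvGrevN, dif_pos hq]
      simp only [List.reverse_cons, List.reverse_nil, List.nil_append,
        List.flatMap_cons, List.flatMap_nil, List.append_nil]
      have hmod : m % 1000 = m := by omega
      rw [hmod]
      by_cases h10 : m < 10
      · rw [pvDigN, dif_pos h10]
        unfold pvTrip pvPad
        have e1 : m / 100 = 0 := by omega
        have e2 : m / 10 % 10 = 0 := by omega
        have e3 : m % 10 = m := by omega
        simp [e1, e2, e3]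
      · by_cases h100 : m < 100
        · rw [pvDigN, dif_neg (by omega), pvDigN, dif_pos (by omega)]
          unfold pvTrip pvPad
          have e1 : m / 100 = 0 := by omega
          have e2 : m / 10 % 10 = m / 10 := by omega
          simp [e1, e2]
        · rw [pvDigN, dif_neg (by omega), pvDigN, dif_neg (by omega),
            pvDigN, dif_pos (by omega)]
          unfold pvTrip pvPad
          have e1 : m / 10 / 10 = m / 100 := by omega
          simp [e1]

-- B = pvPad of the digit list
lemma b_char (m : Nat) :
    decompoe_alt (m : Int) = pvPad ((pvDigN m).map (fun d : Nat => (d : Int))) := by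
  unfold decompoe_alt
  rw [groupsLoop_spec]
  by_cases hm : m = 0
  · subst hm
    rw [pvGrevN]
    norm_num
    rw [pvDigN]
    decide
  · have hne : (pvGrevN m).map (fun g : Nat => (g : Int)) ≠ [] := by
      rw [pvGrevN, dif_neg hm]; simp
    simp only [List.nil_append, if_neg hne]
    rw [← List.map_reverse, foldl_trip, List.nil_append]
    exact expand_eq_pad m (by omega)

-- ===== VERDICT (by name: the statement is the Claim_ definition above) =====
theorem decompoe_spec : Claim_equal_decompoe := by
  intro numero _ hpre
  unfold Spec_decompoe
  obtain ⟨m, rfl⟩ : ∃ m : Nat, numero = (m : Int) :=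
    ⟨numero.toNat, (Int.toNat_of_nonneg hpre).symm⟩
  rw [a_char, b_char]
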